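-- pv_equiv track=rewrite | github.com/SonVH2511/CTFs | CTF_UIU2024/Summarize/sc.py | sub_40174A
-- ===== SOURCE A (Python) =====
-- def sub_40174A(a1, a2):
--     v5 = 0
--     v6 = 0
--     for i in range(32):
--         v7 = a1 & 1
--         v8 = a2 & 1
--         a1 >>= 1
--         a2 >>= 1
--         v5 = (v5+((v8 ^ v7) << v6)) & 0xffffffff
--         v6 += 1
--     return v5
-- ===== SOURCE B (Python) =====
-- def sub_40174A(a1, a2):
--     return (a1 ^ a2) & 0xffffffff
-- ===== Notes on version B (the rewrite author's own statement) =====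
-- stated objective: idiomatic
-- what changed: Replaced the 32-iteration bit-by-bit extract/xor/shift/accumulate loop with the single closed-form expression (a1 ^ a2) & 0xffffffff.
import Mathlib
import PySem

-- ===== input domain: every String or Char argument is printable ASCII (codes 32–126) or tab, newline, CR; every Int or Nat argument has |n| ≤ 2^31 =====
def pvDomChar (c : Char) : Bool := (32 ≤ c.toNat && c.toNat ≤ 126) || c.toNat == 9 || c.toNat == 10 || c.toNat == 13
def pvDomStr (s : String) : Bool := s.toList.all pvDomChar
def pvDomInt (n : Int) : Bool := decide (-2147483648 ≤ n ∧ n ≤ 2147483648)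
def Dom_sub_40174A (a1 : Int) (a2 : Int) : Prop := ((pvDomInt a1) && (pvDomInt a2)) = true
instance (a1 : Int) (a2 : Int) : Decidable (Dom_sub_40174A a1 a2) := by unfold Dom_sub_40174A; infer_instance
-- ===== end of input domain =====

-- B replaces A's 32-iteration per-bit extract/xor/shift/accumulate loop by the closed form (a1 ^ a2) & 0xffffffff (idiomatic one-liner).

-- ===== PORT A =====
-- one loop iteration: state is (a1, a2, v5, v6); the range element is ignored, as in Python
def sub_40174A_step (st : Int × Int × Int × Int) (_i : Int) : Int × Int × Int × Int :=
  let v7 := PySem.Int.band st.1 1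
  let v8 := PySem.Int.band st.2.1 1
  let a1 := st.1 >>> (1 : Nat)
  let a2 := st.2.1 >>> (1 : Nat)
  -- v6 starts at 0 and only grows, so `.toNat` is exact for Python's `<< v6`
  let v5 := PySem.Int.band (st.2.2.1 + (PySem.Int.bxor v8 v7 <<< st.2.2.2.toNat)) 0xffffffff
  let v6 := st.2.2.2 + 1
  (a1, a2, v5, v6)

def sub_40174A (a1 : Int) (a2 : Int) : Int :=
  ((PySem.List.pyRange 0 32 1).foldl sub_40174A_step (a1, a2, 0, 0)).2.2.1

-- ===== PORT B =====
def sub_40174A_alt (a1 : Int) (a2 : Int) : Int :=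
  PySem.Int.band (PySem.Int.bxor a1 a2) 0xffffffff

-- ===== PRECONDITION & SPEC =====
def Spec_sub_40174A (a1 : Int) (a2 : Int) (out : Int) : Prop := out = sub_40174A_alt a1 a2
instance (a1 : Int) (a2 : Int) (out : Int) : Decidable (Spec_sub_40174A a1 a2 out) := by unfold Spec_sub_40174A; infer_instance

-- ===== CLAIM (what is proved, stated in full; the proofs are below) =====
def Claim_equal_sub_40174A : Prop := ∀ (a1 : Int) (a2 : Int), Dom_sub_40174A a1 a2 → Spec_sub_40174A a1 a2 (sub_40174A a1 a2)

-- ===== LEMMAS AND PROOFS =====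

-- `-t-1 mod M` in terms of `t mod M`
theorem pv_negmod (t M : Int) (h : 0 < M) : (-t-1) % M = M - 1 - t % M := by
  have h2 : (-t-1) = (M - 1 - t % M) + M * (-(t / M) - 1) := by
    have := Int.emod_add_mul_ediv t M
    ring_nf; ring_nf at this; omega
  rw [h2, Int.add_mul_emod_self_left]
  have hb := Int.emod_nonneg t (by omega : M ≠ 0)
  have hlt := Int.emod_lt_of_pos t h
  exact Int.emod_eq_of_lt (by omega) (by omega)

-- peel the low bit off a modulus 2*m
theorem pv_modsplit (x m : Int) (hm : 0 < m) : x % (2*m) = x % 2 + 2 * ((x / 2) % m) := by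
  have h2 : x = (x % 2 + 2 * ((x/2) % m)) + (2*m) * (x/2/m) := by
    have a1 := Int.emod_add_mul_ediv x 2
    have a2 := Int.emod_add_mul_ediv (x/2) m
    ring_nf; ring_nf at a1 a2; omega
  conv_lhs => rw [h2]
  rw [Int.add_mul_emod_self_left]
  have b1 := Int.emod_nonneg x (by omega : (2:Int) ≠ 0)
  have b2 := Int.emod_lt_of_pos x (by omega : (0:Int) < 2)
  have b3 := Int.emod_nonneg (x/2) (by omega : m ≠ 0)
  have b4 := Int.emod_lt_of_pos (x/2) hm
  exact Int.emod_eq_of_lt (by omega) (by omega)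

theorem pv_nat_xor_mod_two (m n : Nat) : (m ^^^ n) % 2 = (m % 2 + n % 2) % 2 := by
  have h := Nat.testBit_xor m n 0
  simp only [Nat.testBit_zero] at h
  rcases Nat.mod_two_eq_zero_or_one m with h1 | h1 <;>
    rcases Nat.mod_two_eq_zero_or_one n with h2 | h2 <;>
      simp [h1, h2] at h ⊢ <;> omega

theorem pv_nat_xor_div_two (m n : Nat) : (m ^^^ n) / 2 = (m / 2) ^^^ (n / 2) := by
  have h : (m ^^^ n) >>> 1 = (m >>> 1) ^^^ (n >>> 1) := by
    apply Nat.eq_of_testBit_eq; intro i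
    simp [Nat.testBit_shiftRight, Nat.testBit_xor]
  simpa [Nat.shiftRight_one] using h

theorem pv_shiftr1 (x : Int) : x >>> (1 : Nat) = x / 2 := by
  cases x with
  | ofNat n =>
      show ((n >>> 1 : Nat) : Int) = ((n : Nat) : Int) / 2
      rw [Nat.shiftRight_one]
      omega
  | negSucc t =>
      show (Int.negSucc (t >>> 1)) = _
      rw [Nat.shiftRight_one]
      rw [Int.negSucc_eq, Int.negSucc_eq]
      omega

theorem pv_band_one (a : Int) : PySem.Int.band a 1 = a % 2 := by
  unfold PySem.Int.band
  have e1 : (1 : Int).toNat = 1 := rfl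
  by_cases h : 0 ≤ a
  · rw [if_pos h, if_pos (by omega : (0:Int) ≤ 1), e1]
    have h1 : a.toNat &&& 1 = a.toNat % 2 := Nat.and_one_is_mod a.toNat
    omega
  · rw [if_neg h, if_pos (by omega : (0:Int) ≤ 1), e1]
    have h1 : 1 &&& (-a-1).toNat = (-a-1).toNat % 2 := by
      rw [Nat.and_comm]; exact Nat.and_one_is_mod _
    have h2 := pv_negmod (-a-1) 2 (by omega)
    have h3 : (-(-a-1)-1) = a := by ring
    rw [h3] at h2
    omega

theorem pv_mask (x : Int) : PySem.Int.band x 4294967295 = x % 4294967296 := by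
  have hnat : ∀ t : Nat, t &&& 4294967295 = t % 4294967296 := by
    intro t
    have e : (4294967295 : Nat) = 2 ^ 32 - 1 := by norm_num
    rw [e, Nat.and_two_pow_sub_one_eq_mod]
  have eM : (4294967295 : Int).toNat = 4294967295 := rfl
  unfold PySem.Int.band
  by_cases h : 0 ≤ x
  · rw [if_pos h, if_pos (by omega : (0:Int) ≤ 4294967295), eM]
    have h1 := hnat x.toNat
    omega
  · rw [if_neg h, if_pos (by omega : (0:Int) ≤ 4294967295), eM]
    have h1 : 4294967295 &&& (-x-1).toNat = (-x-1).toNat % 4294967296 := by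
      rw [Nat.and_comm]; exact hnat _
    have h2 := pv_negmod (-x-1) 4294967296 (by omega)
    have h3 : (-(-x-1)-1) = x := by ring
    rw [h3] at h2
    omega

-- parity of xor = parity of sum
theorem pv_bxor_mod_two (a b : Int) : PySem.Int.bxor a b % 2 = (a + b) % 2 := by
  unfold PySem.Int.bxor
  by_cases ha : 0 ≤ a <;> by_cases hb : 0 ≤ b
  · rw [if_pos ha, if_pos hb]
    have := pv_nat_xor_mod_two a.toNat b.toNat
    have hc : ((a.toNat ^^^ b.toNat : Nat) : Int) % 2 = (((a.toNat ^^^ b.toNat) % 2 : Nat) : Int) := by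
      push_cast; omega
    omega
  · rw [if_pos ha, if_neg hb]
    have := pv_nat_xor_mod_two a.toNat (-b-1).toNat
    have hc : ((a.toNat ^^^ (-b-1).toNat : Nat) : Int) % 2 = (((a.toNat ^^^ (-b-1).toNat) % 2 : Nat) : Int) := by
      push_cast; omega
    have hm := pv_negmod ((a.toNat ^^^ (-b-1).toNat : Nat) : Int) 2 (by omega)
    omega
  · rw [if_neg ha, if_pos hb]
    have := pv_nat_xor_mod_two (-a-1).toNat b.toNat
    have hc : (((-a-1).toNat ^^^ b.toNat : Nat) : Int) % 2 = ((((-a-1).toNat ^^^ b.toNat) % 2 : Nat) : Int) := by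
      push_cast; omega
    have hm := pv_negmod (((-a-1).toNat ^^^ b.toNat : Nat) : Int) 2 (by omega)
    omega
  · rw [if_neg ha, if_neg hb]
    have := pv_nat_xor_mod_two (-a-1).toNat (-b-1).toNat
    have hc : (((-a-1).toNat ^^^ (-b-1).toNat : Nat) : Int) % 2 = ((((-a-1).toNat ^^^ (-b-1).toNat) % 2 : Nat) : Int) := by
      push_cast; omega
    omega

-- xor commutes with halving (arithmetic shift right by one)
theorem pv_bxor_div_two (a b : Int) : PySem.Int.bxor (a / 2) (b / 2) = PySem.Int.bxor a b / 2 := by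
  unfold PySem.Int.bxor
  by_cases ha : 0 ≤ a <;> by_cases hb : 0 ≤ b
  · rw [if_pos ha, if_pos hb, if_pos (by omega : 0 ≤ a / 2), if_pos (by omega : 0 ≤ b / 2)]
    have hx := pv_nat_xor_div_two a.toNat b.toNat
    have h1 : (a/2).toNat = a.toNat / 2 := by omega
    have h2 : (b/2).toNat = b.toNat / 2 := by omega
    rw [h1, h2, ← hx]
    omega
  · rw [if_pos ha, if_neg hb, if_pos (by omega : 0 ≤ a / 2), if_neg (by omega : ¬ 0 ≤ b / 2)]
    have hx := pv_nat_xor_div_two a.toNat (-b-1).toNat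
    have h1 : (a/2).toNat = a.toNat / 2 := by omega
    have h2 : (-(b/2)-1).toNat = (-b-1).toNat / 2 := by omega
    rw [h1, h2, ← hx]
    omega
  · rw [if_neg ha, if_pos hb, if_neg (by omega : ¬ 0 ≤ a / 2), if_pos (by omega : 0 ≤ b / 2)]
    have hx := pv_nat_xor_div_two (-a-1).toNat b.toNat
    have h1 : (-(a/2)-1).toNat = (-a-1).toNat / 2 := by omega
    have h2 : (b/2).toNat = b.toNat / 2 := by omega
    rw [h1, h2, ← hx]
    omega
  · rw [if_neg ha, if_neg hb, if_neg (by omega : ¬ 0 ≤ a / 2), if_neg (by omega : ¬ 0 ≤ b / 2)]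
    have hx := pv_nat_xor_div_two (-a-1).toNat (-b-1).toNat
    have h1 : (-(a/2)-1).toNat = (-a-1).toNat / 2 := by omega
    have h2 : (-(b/2)-1).toNat = (-b-1).toNat / 2 := by omega
    rw [h1, h2, ← hx]
    omega

theorem pv_one_shl (k : Nat) : (1 : Int) <<< k = 2 ^ k := by
  show ((1 <<< k : Nat) : Int) = 2 ^ k
  rw [Nat.one_shiftLeft]
  push_cast; ring

theorem pv_zero_shl (k : Nat) : (0 : Int) <<< k = 0 := by
  show (Int.ofNat (0 <<< k)) = _
  simp [Nat.shiftLeft_eq]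

-- loop invariant: running A's body over a list of n (ignored) elements from
-- state (a, b, v5, k) with 0 ≤ v5 < 2^k and k + n ≤ 32 adds the low n bits of
-- a XOR b, placed at position k, to v5
theorem pv_loop_spec (l : List Int) : ∀ (a b v5 : Int) (k : Nat),
    0 ≤ v5 → v5 < 2 ^ k → k + l.length ≤ 32 →
    (l.foldl sub_40174A_step (a, b, v5, (k : Int))).2.2.1
      = v5 + (PySem.Int.bxor a b % 2 ^ l.length) * 2 ^ k := by
  induction l with
  | nil => intro a b v5 k h0 h1 h2; simp
  | cons x l ih =>
      intro a b v5 k h0 h1 h2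
      rw [List.foldl_cons]
      have hstep : sub_40174A_step (a, b, v5, (k : Int)) x
          = (a / 2, b / 2, v5 + (PySem.Int.bxor a b % 2) * 2 ^ k, ((k + 1 : Nat) : Int)) := by
        unfold sub_40174A_step
        simp only [pv_shiftr1, pv_band_one, Int.toNat_natCast]
        refine Prod.ext rfl (Prod.ext rfl (Prod.ext ?_ (by push_cast; ring)))
        show PySem.Int.band (v5 + PySem.Int.bxor (b % 2) (a % 2) <<< k) 4294967295
            = v5 + PySem.Int.bxor a b % 2 * 2 ^ k
        have hxor : PySem.Int.bxor (b % 2) (a % 2) = PySem.Int.bxor a b % 2 := by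
          have key : ∀ u v : Int, u = 0 ∨ u = 1 → v = 0 ∨ v = 1 →
              PySem.Int.bxor v u = (u + v) % 2 := by
            rintro u v (rfl | rfl) (rfl | rfl) <;> decide
          have hp := pv_bxor_mod_two a b
          rw [key (a % 2) (b % 2) (Int.emod_two_eq a) (Int.emod_two_eq b)]
          omega
        rw [hxor]
        have hb2 := Int.emod_two_eq (PySem.Int.bxor a b)
        have hk : 2 ^ k ≤ (2 : Int) ^ 31 := by
          have hlc : (x :: l).length = l.length + 1 := rfl
          have : k ≤ 31 := by omega
          exact pow_le_pow_right₀ (by omega) this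
        rcases hb2 with hb | hb <;> rw [hb]
        · rw [pv_zero_shl, pv_mask, add_zero, mul_comm]
          have : (4294967296 : Int) = 2 ^ 32 := by norm_num
          rw [Int.emod_eq_of_lt h0 (by nlinarith [pow_le_pow_right₀ (by omega : (1:Int) ≤ 2) (by omega : k ≤ 32)])]
          ring
        · rw [pv_one_shl, pv_mask]
          rw [Int.emod_eq_of_lt (by positivity) ?hlt]
          · ring
          case hlt =>
            have h32 : (2:Int) ^ k + 2 ^ k ≤ 2 ^ 32 := by
              have hk32 : k + 1 ≤ 32 := by
                have hlc : (x :: l).length = l.length + 1 := rfl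
                omega
              calc (2:Int) ^ k + 2 ^ k = 2 ^ (k+1) := by ring
                _ ≤ 2 ^ 32 := pow_le_pow_right₀ (by omega) hk32
            omega
      rw [hstep]
      have hk1 : (k : Int) + 1 = ((k + 1 : Nat) : Int) := by push_cast; ring
      have hrec := ih (a / 2) (b / 2) (v5 + (PySem.Int.bxor a b % 2) * 2 ^ k) (k + 1)
        (by have := Int.emod_nonneg (PySem.Int.bxor a b) (by omega : (2:Int) ≠ 0); positivity)
        (by
          have hb1 := Int.emod_nonneg (PySem.Int.bxor a b) (by omega : (2:Int) ≠ 0)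
          have hb2 := Int.emod_lt_of_pos (PySem.Int.bxor a b) (by omega : (0:Int) < 2)
          have : (2:Int) ^ (k+1) = 2 ^ k + 2 ^ k := by ring
          nlinarith [pow_pos (by omega : (0:Int) < 2) k])
        (by simp only [List.length_cons] at h2; omega)
      rw [hrec, pv_bxor_div_two]
      have hsplit := pv_modsplit (PySem.Int.bxor a b) (2 ^ l.length)
        (pow_pos (by omega) l.length)
      have hlen : (2:Int) * 2 ^ l.length = 2 ^ (x :: l).length := by
        rw [List.length_cons]; ring
      rw [← hlen]
      rw [hsplit]
      ring

-- ===== VERDICT (by name: the statement is the Claim_ definition above) =====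
theorem sub_40174A_spec : Claim_equal_sub_40174A := by
  intro a1 a2 _hdom
  unfold Spec_sub_40174A sub_40174A sub_40174A_alt
  have hr : PySem.List.pyRange 0 32 1 = [0,1,2,3,4,5,6,7,8,9,10,11,12,13,14,15,16,17,18,19,20,21,22,23,24,25,26,27,28,29,30,31] := by decide
  have h := pv_loop_spec (PySem.List.pyRange 0 32 1) a1 a2 0 0 (by omega) (by norm_num) (by rw [hr]; decide)
  have hlen : (PySem.List.pyRange 0 32 1).length = 32 := by rw [hr]; rfl
  rw [hlen] at h
  simpa [pv_mask, (by norm_num : (4294967296:Int) = 2 ^ 32)] using h
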